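-- pv_equiv track=rewrite | github.com/The-Daishogun/coding-exercises | loknat.py | change_words
-- ===== SOURCE A (Python) =====
-- def change_words(word):
--     word = word.lower()
--     total = 1
--     for char in word:
--
--         if char == "l" or char == "f":
--             total *= 2
--         elif char == "d":
--             total *= 2
--         elif char == "t":
--             total *= 2
--
--     return total
-- ===== SOURCE B (Python) =====
-- def change_words(word):
--     w = word.lower()
--     return 2 ** (w.count('l') + w.count('f') + w.count('d') + w.count('t'))
-- ===== Notes on version B (the rewrite author's own statement) =====
-- stated objective: faster
-- what changed: Replaces A's single per-character loop with a branch chain and a running product by four independent str.count substring scans (one per relevant letter, no Python-level loop) whose sum feeds the closed form 2 ** count.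
import Mathlib
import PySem

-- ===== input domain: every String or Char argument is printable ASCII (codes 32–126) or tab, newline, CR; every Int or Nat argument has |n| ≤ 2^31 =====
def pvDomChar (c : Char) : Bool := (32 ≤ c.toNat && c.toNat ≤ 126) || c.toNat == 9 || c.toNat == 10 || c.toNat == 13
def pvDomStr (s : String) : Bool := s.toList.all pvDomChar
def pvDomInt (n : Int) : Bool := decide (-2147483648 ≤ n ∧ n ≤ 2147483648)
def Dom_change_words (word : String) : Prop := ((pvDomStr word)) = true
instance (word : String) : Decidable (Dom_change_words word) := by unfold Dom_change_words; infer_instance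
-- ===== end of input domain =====

-- B replaces A's per-character loop (branch chain + running product) by four str.count scans and the closed form 2 ^ count.

-- ===== PORT A =====
-- doubling loop over the lowered word, branch for branch as in A
def change_words (word : String) : Int :=
  (PySem.Str.lower word).toList.foldl (fun total char =>
    if char = 'l' ∨ char = 'f' then total * 2
    else if char = 'd' then total * 2
    else if char = 't' then total * 2
    else total) 1

-- ===== PORT B =====
-- four independent substring-count scans of the lowered word, then 2 ^ (their sum)
def change_words_alt (word : String) : Int :=
  let w := PySem.Str.lower word
  (2 : Int) ^ (PySem.Str.count w "l" + PySem.Str.count w "f"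
             + PySem.Str.count w "d" + PySem.Str.count w "t")

-- ===== PRECONDITION & SPEC =====
def Spec_change_words (word : String) (out : Int) : Prop := out = change_words_alt word
instance (word : String) (out : Int) : Decidable (Spec_change_words word out) := by unfold Spec_change_words; infer_instance

-- ===== CLAIM (what is proved, stated in full; the proofs are below) =====
def Claim_equal_change_words : Prop := ∀ (word : String), Dom_change_words word → Spec_change_words word (change_words word)

-- ===== LEMMAS AND PROOFS =====
-- Python's s.count(c) for a single character c is the character count.
theorem chars_count_go_singleton (c : Char) (l : List Char) (acc : Nat) :
    PySem.Chars.count.go [c] l.length l acc = acc + l.count c := by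
  induction l generalizing acc with
  | nil => simp [PySem.Chars.count.go]
  | cons h t ih =>
    show PySem.Chars.count.go [c] (t.length + 1) (h :: t) acc = _
    rw [PySem.Chars.count.go]
    by_cases hc : c = h
    · subst hc
      simp [List.isPrefixOf, ih]
      omega
    · have hp : [c].isPrefixOf (h :: t) = false := by
        simp [List.isPrefixOf]
        exact fun e => (hc e).elim
      simp [hp, ih, List.count_cons]
      exact fun e => hc e.symm

theorem chars_count_singleton (c : Char) (l : List Char) :
    PySem.Chars.count l [c] = l.count c := by
  simp [PySem.Chars.count]
  rw [chars_count_go_singleton c l 0]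
  omega

-- countP of the four-way disjunction is the sum of the four character counts
theorem countP_four (l : List Char) :
    l.countP (fun c => c = 'l' || c = 'f' || c = 'd' || c = 't')
      = l.count 'l' + l.count 'f' + l.count 'd' + l.count 't' := by
  induction l with
  | nil => simp
  | cons h t ih =>
    simp only [List.countP_cons, List.count_cons, ih]
    by_cases h1 : h = 'l' <;> by_cases h2 : h = 'f' <;> by_cases h3 : h = 'd' <;>
      by_cases h4 : h = 't' <;> simp_all <;> omega

-- A's loop is a running product: foldl = init * 2 ^ (number of matching chars)
theorem change_words_foldl_eq (l : List Char) (t : Int) :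
    l.foldl (fun total char =>
      if char = 'l' ∨ char = 'f' then total * 2
      else if char = 'd' then total * 2
      else if char = 't' then total * 2
      else total) t
      = t * (2 : Int) ^ (l.countP (fun c => c = 'l' || c = 'f' || c = 'd' || c = 't')) := by
  induction l generalizing t with
  | nil => simp
  | cons c cs ih =>
    simp only [List.foldl_cons, List.countP_cons, ih]
    by_cases h1 : c = 'l' ∨ c = 'f'
    · rcases h1 with h | h <;> subst h <;> simp [pow_succ] <;> ring
    · by_cases h2 : c = 'd'
      · subst h2; simp [pow_succ]; ring
      · by_cases h3 : c = 't'
        · subst h3; simp [pow_succ]; ring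
        · simp [h1, h2, h3]

-- ===== VERDICT (by name: the statement is the Claim_ definition above) =====
theorem change_words_spec : Claim_equal_change_words := by
  intro word _
  unfold Spec_change_words change_words change_words_alt
  rw [change_words_foldl_eq]
  simp [PySem.Str.count, chars_count_singleton, countP_four]
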